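-- pv_equiv track=rewrite | github.com/KolodnitskyIlya/omgtu | olympiads/2 term/tau-ceti.py | generate_palindrome
-- ===== SOURCE A (Python) =====
-- def generate_palindrome(word):
--     palindrome = ""
--     if len(word) % 2 == 0:
--         middle_idx = len(word) // 2
--         palindrome += word[middle_idx]
--         for i in range(1, middle_idx + 1):
--             palindrome += word[middle_idx - i]
--             if i < middle_idx:
--                 palindrome += word[middle_idx + i]
--     else:
--         middle_idx = (len(word) - 1) // 2
--         palindrome += word[middle_idx]
--         for i in range(1, middle_idx + 1):
--             palindrome += word[middle_idx - i]
--             palindrome += word[middle_idx + i]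
--     return palindrome
-- ===== SOURCE B (Python) =====
-- def generate_palindrome(word):
--     m = len(word) // 2
--     left = word[:m][::-1]
--     right = word[m + 1:]
--     pairs = [l + r for l, r in zip(left, right)]
--     return word[m] + ''.join(pairs) + left[len(right):]
-- ===== Notes on version B (the rewrite author's own statement) =====
-- stated objective: alternative
-- what changed: Replaces the index-arithmetic loop around the middle position with an explicit decomposition: take the middle character, reverse the left half, zip it with the right half into pairs, join them once and append the leftover left character.
import Mathlib
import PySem

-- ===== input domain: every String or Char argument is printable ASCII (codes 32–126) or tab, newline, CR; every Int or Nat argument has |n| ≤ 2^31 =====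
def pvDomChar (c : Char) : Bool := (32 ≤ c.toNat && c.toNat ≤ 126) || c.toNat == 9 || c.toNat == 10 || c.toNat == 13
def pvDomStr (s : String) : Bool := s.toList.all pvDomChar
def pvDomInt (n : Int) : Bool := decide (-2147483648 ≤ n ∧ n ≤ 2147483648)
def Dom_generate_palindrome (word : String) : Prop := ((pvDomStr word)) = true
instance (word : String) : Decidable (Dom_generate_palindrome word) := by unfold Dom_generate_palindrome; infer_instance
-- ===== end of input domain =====

-- B builds the result by a middle/left-reversed-half/right-half decomposition with a recursive
-- interleave instead of A's single index-arithmetic loop ('alternative', same cost).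

-- `word[i]` as a one-char list; [] where Python raises IndexError (excluded by Pre_).
def pvCharAt (w : List Char) (i : Int) : List Char :=
  (PySem.List.pyGet? w i).elim [] ([·])

-- ===== PORT A =====
def generate_palindrome (word : String) : String :=
  let w := word.toList
  let n : Int := (w.length : Int)
  let chars :=
    if PySem.Int.mod n 2 = 0 then
      let m := PySem.Int.floordiv n 2
      let p := ([] : List Char) ++ pvCharAt w m
      (PySem.List.pyRange 1 (m + 1) 1).foldl
        (fun acc i =>
          let acc' := acc ++ pvCharAt w (m - i)
          if i < m then acc' ++ pvCharAt w (m + i) else acc') p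
    else
      let m := PySem.Int.floordiv (n - 1) 2
      let p := ([] : List Char) ++ pvCharAt w m
      (PySem.List.pyRange 1 (m + 1) 1).foldl
        (fun acc i => (acc ++ pvCharAt w (m - i)) ++ pvCharAt w (m + i)) p
  String.ofList chars

-- ===== PORT B =====
def generate_palindrome_alt (word : String) : String :=
  let w := word.toList
  let m := w.length / 2
  let left := (w.take m).reverse
  let right := w.drop (m + 1)
  let pairs := (left.zip right).map (fun p => [p.1, p.2])
  String.ofList (pvCharAt w (m : Int) ++ pairs.flatten ++ left.drop right.length)

-- ===== PRECONDITION & SPEC =====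
-- Pre_ excludes exactly the empty string, on which A raises IndexError (word[middle_idx]).
def Pre_generate_palindrome (word : String) : Prop := word ≠ ""
instance (word : String) : Decidable (Pre_generate_palindrome word) := by
  unfold Pre_generate_palindrome; infer_instance

def pvWitness_generate_palindrome : String := "abc"

def Spec_generate_palindrome (word : String) (out : String) : Prop :=
  out = generate_palindrome_alt word
instance (word : String) (out : String) : Decidable (Spec_generate_palindrome word out) := by
  unfold Spec_generate_palindrome; infer_instance

-- ===== CLAIM (what is proved, stated in full; the proofs are below) =====
def Claim_equal_generate_palindrome : Prop :=
  ∀ (word : String), Dom_generate_palindrome word → Pre_generate_palindrome word →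
    Spec_generate_palindrome word (generate_palindrome word)

-- ===== LEMMAS AND PROOFS =====

theorem pyRange_map_add (k : Nat) (a : Int) :
    PySem.List.pyRange a (a + (k : Int)) 1 = (PySem.List.pyRange 0 (k : Int) 1).map (a + ·) := by
  induction k with
  | zero => simp [PySem.List.pyRange_one_eq_nil]
  | succ k ih =>
    have h1 : a + ((k + 1 : Nat) : Int) = (a + k) + 1 := by push_cast; ring
    have h2 : ((k + 1 : Nat) : Int) = (k : Int) + 1 := by push_cast; ring
    rw [h1, h2, PySem.List.pyRange_one_succ_right (by omega),
        PySem.List.pyRange_one_succ_right (by omega), List.map_append, ih]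
    simp

-- the core correspondence: A's position loop, re-indexed from 0, is the zip-interleave of the halves
theorem fold_interleave (d : Char) :
    ∀ (L R : List Char), R.length ≤ L.length → ∀ acc : List Char,
      (PySem.List.pyRange 0 (L.length : Int) 1).foldl
        (fun acc j =>
          acc ++ [L.getD j.toNat d] ++
            (if j.toNat < R.length then [R.getD j.toNat d] else [])) acc
      = acc ++ ((L.zip R).map (fun p => [p.1, p.2])).flatten ++ L.drop R.length := by
  intro L
  induction L with
  | nil =>
    intro R hR acc
    have hR0 : R = [] := List.eq_nil_of_length_eq_zero (by simpa using hR)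
    subst hR0
    simp [PySem.List.pyRange_one_eq_nil]
  | cons x L' ih =>
    intro R hR acc
    have hcons : PySem.List.pyRange 0 ((x :: L').length : Int) 1
        = 0 :: (PySem.List.pyRange 0 (L'.length : Int) 1).map (1 + ·) := by
      have h1 : ((x :: L').length : Int) = 1 + (L'.length : Int) := by simp; omega
      rw [h1, PySem.List.pyRange_one_cons (by omega), zero_add, ← pyRange_map_add]
    rw [hcons]
    simp only [List.foldl_cons, List.foldl_map]
    cases R with
    | nil =>
      refine Eq.trans (PySem.List.foldl_congr_mem _ _
        (fun acc (j : Int) => acc ++ [L'.getD j.toNat d] ++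
          (if j.toNat < ([] : List Char).length then [([] : List Char).getD j.toNat d] else [])) _ ?_) ?_
      · intro acc j hj
        have hj0 : 0 ≤ j := (PySem.List.mem_pyRange_one.mp hj).1
        have ht : (1 + j).toNat = j.toNat + 1 := by omega
        simp [ht]
      · rw [ih [] (by simp) _]
        simp
    | cons y R' =>
      refine Eq.trans (PySem.List.foldl_congr_mem _ _
        (fun acc (j : Int) => acc ++ [L'.getD j.toNat d] ++
          (if j.toNat < R'.length then [R'.getD j.toNat d] else [])) _ ?_) ?_
      · intro acc j hj
        have hj0 : 0 ≤ j := (PySem.List.mem_pyRange_one.mp hj).1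
        have ht : (1 + j).toNat = j.toNat + 1 := by omega
        simp [ht]
      · rw [ih R' (by simpa using hR) _]
        simp

theorem charAt_left (w : List Char) (mN jn : Nat) (d : Char)
    (hj : jn < mN) (hmn : mN ≤ w.length) :
    pvCharAt w ((mN : Int) - (1 + (jn : Int))) = [((w.take mN).reverse).getD jn d] := by
  have h1 : ((mN : Int) - (1 + (jn : Int))) = ((mN - 1 - jn : Nat) : Int) := by omega
  have h2 : mN - 1 - jn < w.length := by omega
  have h3 : jn < ((w.take mN).reverse).length := by simp; omega
  rw [h1]
  unfold pvCharAt
  rw [PySem.List.pyGet?_natCast, List.getElem?_eq_getElem h2,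
      List.getD_eq_getElem _ _ h3, List.getElem_reverse, List.getElem_take]
  simp [Nat.min_eq_left hmn]

theorem charAt_right (w : List Char) (mN jn : Nat) (d : Char)
    (hj : mN + 1 + jn < w.length) :
    pvCharAt w ((mN : Int) + (1 + (jn : Int))) = [(w.drop (mN + 1)).getD jn d] := by
  have h1 : ((mN : Int) + (1 + (jn : Int))) = ((mN + 1 + jn : Nat) : Int) := by omega
  have h3 : jn < (w.drop (mN + 1)).length := by simp; omega
  rw [h1]
  unfold pvCharAt
  rw [PySem.List.pyGet?_natCast, List.getElem?_eq_getElem hj,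
      List.getD_eq_getElem _ _ h3, List.getElem_drop]
  rfl

-- ===== VERDICT (by name: the statement is the Claim_ definition above) =====
theorem generate_palindrome_spec : Claim_equal_generate_palindrome := by
  intro word _ hpre
  unfold Spec_generate_palindrome generate_palindrome generate_palindrome_alt
  have hne : word.toList ≠ [] := fun h => hpre (String.toList_eq_nil_iff.mp h)
  dsimp only
  set w := word.toList with hw
  have hn : 0 < w.length := List.length_pos_iff.mpr hne
  set mN := w.length / 2 with hmN
  set L := (w.take mN).reverse with hL
  set R := w.drop (mN + 1) with hR
  have hLlen : L.length = mN := by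
    rw [hL]; simp; omega
  have hRlen : R.length = w.length - (mN + 1) := by
    rw [hR]; simp
  by_cases hpar : w.length % 2 = 0
  · have hmod : PySem.Int.mod (w.length : Int) 2 = 0 := by
      have h := PySem.Int.mod_natCast w.length 2
      rw [show ((2 : Int)) = ((2 : Nat) : Int) from rfl, h, hpar]
      rfl
    rw [if_pos hmod]
    have hdiv : PySem.Int.floordiv (w.length : Int) 2 = ((mN : Nat) : Int) := by
      rw [show ((2 : Int)) = ((2 : Nat) : Int) from rfl]
      exact_mod_cast PySem.Int.floordiv_natCast w.length 2
    rw [hdiv, List.nil_append]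
    refine congrArg String.ofList ?_
    have hrange : PySem.List.pyRange 1 ((mN : Int) + 1) 1
        = (PySem.List.pyRange 0 (mN : Int) 1).map (1 + ·) := by
      rw [show ((mN : Int) + 1) = 1 + (mN : Int) from by ring]
      exact pyRange_map_add mN 1
    rw [hrange, List.foldl_map]
    refine Eq.trans (PySem.List.foldl_congr_mem _ _
      (fun acc (j : Int) => acc ++ [L.getD j.toNat 'a'] ++
        (if j.toNat < R.length then [R.getD j.toNat 'a'] else [])) _ ?_) ?_
    · intro acc j hj
      obtain ⟨hj0, hj1⟩ := PySem.List.mem_pyRange_one.mp hj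
      have hjc : j = (j.toNat : Int) := by omega
      have hjn : j.toNat < mN := by omega
      have hmax : max j 0 = j := by omega
      dsimp only
      rw [hjc, charAt_left w mN j.toNat 'a' hjn (by omega)]
      by_cases hc : j.toNat + 1 < mN
      · rw [if_pos (by omega), if_pos (by rw [hRlen]; omega),
            charAt_right w mN j.toNat 'a' (by omega)]
        simp [hL, hR, hmax]
      · rw [if_neg (by omega), if_neg (by rw [hRlen]; omega)]
        simp [hL, hmax]
    · have h := fold_interleave 'a' L R (by rw [hLlen, hRlen]; omega) (pvCharAt w (mN : Int))
      rw [hLlen] at h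
      exact h
  · have hmod : ¬ PySem.Int.mod (w.length : Int) 2 = 0 := by
      have h := PySem.Int.mod_natCast w.length 2
      rw [show ((2 : Int)) = ((2 : Nat) : Int) from rfl, h]
      intro hz
      exact hpar (by exact_mod_cast hz)
    rw [if_neg hmod]
    have hdiv : PySem.Int.floordiv ((w.length : Int) - 1) 2 = ((mN : Nat) : Int) := by
      rw [show ((w.length : Int) - 1) = (((w.length - 1 : Nat)) : Int) from by omega,
          show ((2 : Int)) = ((2 : Nat) : Int) from rfl]
      have h := PySem.Int.floordiv_natCast (w.length - 1) 2
      rw [h]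
      congr 1
      omega
    rw [hdiv, List.nil_append]
    refine congrArg String.ofList ?_
    have hrange : PySem.List.pyRange 1 ((mN : Int) + 1) 1
        = (PySem.List.pyRange 0 (mN : Int) 1).map (1 + ·) := by
      rw [show ((mN : Int) + 1) = 1 + (mN : Int) from by ring]
      exact pyRange_map_add mN 1
    rw [hrange, List.foldl_map]
    refine Eq.trans (PySem.List.foldl_congr_mem _ _
      (fun acc (j : Int) => acc ++ [L.getD j.toNat 'a'] ++
        (if j.toNat < R.length then [R.getD j.toNat 'a'] else [])) _ ?_) ?_
    · intro acc j hj
      obtain ⟨hj0, hj1⟩ := PySem.List.mem_pyRange_one.mp hj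
      have hjc : j = (j.toNat : Int) := by omega
      have hjn : j.toNat < mN := by omega
      have hmax : max j 0 = j := by omega
      dsimp only
      rw [hjc, charAt_left w mN j.toNat 'a' hjn (by omega),
          if_pos (by rw [hRlen]; omega),
          charAt_right w mN j.toNat 'a' (by omega)]
      simp [hL, hR, hmax]
    · have h := fold_interleave 'a' L R (by rw [hLlen, hRlen]; omega) (pvCharAt w (mN : Int))
      rw [hLlen] at h
      exact h
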